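-- pv_equiv track=rewrite | github.com/Dangy1/Agent | backend/oran_agent/validators.py | _extract_kpm_indication_lines
-- ===== SOURCE A (Python) =====
-- from typing import Any, Dict, List, Optional
--
-- def _looks_like_kpm_line(line: str) -> bool:
--     s = line.lower()
--     if "meas=" in s:
--         return True
--     return ("kpm" in s and ("indication" in s or "metric" in s or "rru" in s or "ue" in s))
--
-- def _extract_kpm_indication_lines(lines: List[str], max_items: int = 12) -> List[str]:
--     picked: List[str] = []
--     seen: set[str] = set()
--     for line in reversed(lines):
--         text = str(line).strip()
--         if not text or not _looks_like_kpm_line(text):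
--             continue
--         if text in seen:
--             continue
--         seen.add(text)
--         picked.append(text)
--         if len(picked) >= max_items:
--             break
--     picked.reverse()
--     return picked
-- ===== SOURCE B (Python) =====
-- from typing import List
--
-- def _looks_like_kpm_line(line: str) -> bool:
--     s = line.lower()
--     if "meas=" in s:
--         return True
--     return ("kpm" in s and ("indication" in s or "metric" in s or "rru" in s or "ue" in s))
--
-- def _extract_kpm_indication_lines(lines: List[str], max_items: int = 12) -> List[str]:
--     # one forward pass; keep the LAST occurrence of each text, in order
--     result: List[str] = []
--     for line in lines:
--         text = str(line).strip()
--         if not text or not _looks_like_kpm_line(text):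
--             continue
--         if text in result:
--             result.remove(text)
--         result.append(text)
--     return result[-max_items:] if max_items > 0 else []
-- ===== Notes on version B (the rewrite author's own statement) =====
-- stated objective: alternative
-- what changed: Single forward pass that keeps the LAST occurrence of each KPM text in order (remove-earlier-then-append) followed by one slice of the last max_items entries, instead of A's reversed scan with a seen-set, early break and final reverse.
-- intended difference: When max_items <= 0 and at least one line is a non-empty KPM-like line, A returns a 1-element list (the last matching text) because its break fires only after the first append, while B returns an empty list, which is the intended meaning of 'at most max_items items'. — e.g. on _extract_kpm_indication_lines(["kpm metric"], 0): A returns ["kpm metric"], B returns []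
import Mathlib
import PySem

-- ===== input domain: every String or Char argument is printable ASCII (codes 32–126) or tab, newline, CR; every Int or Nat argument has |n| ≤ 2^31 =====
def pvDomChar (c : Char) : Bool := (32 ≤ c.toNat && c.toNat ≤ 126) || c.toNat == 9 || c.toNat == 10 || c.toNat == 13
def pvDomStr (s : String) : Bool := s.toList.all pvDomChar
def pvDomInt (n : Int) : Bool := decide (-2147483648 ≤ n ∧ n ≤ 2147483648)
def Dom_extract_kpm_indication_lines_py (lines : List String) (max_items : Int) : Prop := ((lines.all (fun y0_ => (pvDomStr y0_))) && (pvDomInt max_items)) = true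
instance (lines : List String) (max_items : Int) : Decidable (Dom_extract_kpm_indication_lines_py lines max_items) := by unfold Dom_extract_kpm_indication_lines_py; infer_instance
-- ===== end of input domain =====

-- B replaces A's reversed scan + seen-set + early break + final reverse by one forward pass keeping the
-- LAST occurrence of each text and a single slice (alternative decomposition, similar cost).

-- shared module helper _looks_like_kpm_line
def pvLooksLikeKpm (line : String) : Bool :=
  let s := PySem.Str.lower line
  if PySem.Str.isIn "meas=" s then true
  else PySem.Str.isIn "kpm" s &&
    (PySem.Str.isIn "indication" s || PySem.Str.isIn "metric" s ||
     PySem.Str.isIn "rru" s || PySem.Str.isIn "ue" s)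

-- "this stripped line is kept": non-empty and KPM-like
def pvKeep (t : String) : Bool := !(t == "") && pvLooksLikeKpm t

-- ===== PORT A =====
def pvALoop (max_items : Int) : List String → List String → PySem.Set String → List String
  | [], picked, _ => picked
  | line :: rest, picked, seen =>
    let text := PySem.Str.strip line
    if text == "" || !pvLooksLikeKpm text then pvALoop max_items rest picked seen
    else if PySem.Set.contains seen text then pvALoop max_items rest picked seen
    else
      let picked' := picked ++ [text]
      if max_items ≤ (picked'.length : Int) then picked'
      else pvALoop max_items rest picked' (PySem.Set.add seen text)

def extract_kpm_indication_lines_py (lines : List String) (max_items : Int) : List String :=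
  (pvALoop max_items lines.reverse [] PySem.Set.empty).reverse

-- ===== PORT B =====
def pvBStep (res : List String) (line : String) : List String :=
  let text := PySem.Str.strip line
  if text == "" || !pvLooksLikeKpm text then res
  else
    let res' := if res.contains text then (PySem.List.remove? res text).getD res else res
    res' ++ [text]

def extract_kpm_indication_lines_py_alt (lines : List String) (max_items : Int) : List String :=
  let res := lines.foldl pvBStep []
  if 0 < max_items then PySem.List.slice res (some (-max_items)) none else []

-- ===== PRECONDITION & SPEC =====
-- When max_items ≤ 0 and some line is a non-empty KPM-like line, A returns a one-element list (the last
-- matching text) because its break fires only after the first append, while B returns an empty list, the intended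
-- meaning of "at most max_items items".
def D_extract_kpm_indication_lines_py (lines : List String) (max_items : Int) : Prop :=
  max_items ≤ 0 ∧ lines.any (fun l => pvKeep (PySem.Str.strip l)) = true
instance (lines : List String) (max_items : Int) : Decidable (D_extract_kpm_indication_lines_py lines max_items) := by
  unfold D_extract_kpm_indication_lines_py; infer_instance

def Spec_extract_kpm_indication_lines_py (lines : List String) (max_items : Int) (out : List String) : Prop :=
  ¬ D_extract_kpm_indication_lines_py lines max_items → out = extract_kpm_indication_lines_py_alt lines max_items
instance (lines : List String) (max_items : Int) (out : List String) : Decidable (Spec_extract_kpm_indication_lines_py lines max_items out) := by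
  unfold Spec_extract_kpm_indication_lines_py; infer_instance

def pvDiffWitness_extract_kpm_indication_lines_py : List String × Int := (["kpm metric"], 0)
def pvDiffWitnessOut_extract_kpm_indication_lines_py : (List String) × (List String) := (["kpm metric"], [])

-- ===== CLAIM (what is proved, stated in full; the proofs are below) =====
def Claim_unchanged_extract_kpm_indication_lines_py : Prop := ∀ (lines : List String) (max_items : Int), Dom_extract_kpm_indication_lines_py lines max_items → Spec_extract_kpm_indication_lines_py lines max_items (extract_kpm_indication_lines_py lines max_items)
def Claim_changed_extract_kpm_indication_lines_py : Prop := Dom_extract_kpm_indication_lines_py (pvDiffWitness_extract_kpm_indication_lines_py.1) (pvDiffWitness_extract_kpm_indication_lines_py.2) ∧ D_extract_kpm_indication_lines_py (pvDiffWitness_extract_kpm_indication_lines_py.1) (pvDiffWitness_extract_kpm_indication_lines_py.2) ∧ extract_kpm_indication_lines_py (pvDiffWitness_extract_kpm_indication_lines_py.1) (pvDiffWitness_extract_kpm_indication_lines_py.2) = pvDiffWitnessOut_extract_kpm_indication_lines_py.1 ∧ extract_kpm_indication_lines_py_alt (pvDiffWitness_extract_kpm_indication_lines_py.1) (pvDiffWitness_extract_kpm_indication_lines_py.2)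 = pvDiffWitnessOut_extract_kpm_indication_lines_py.2 ∧ pvDiffWitnessOut_extract_kpm_indication_lines_py.1 ≠ pvDiffWitnessOut_extract_kpm_indication_lines_py.2
def Claim_exact_extract_kpm_indication_lines_py : Prop := ∀ (lines : List String) (max_items : Int), Dom_extract_kpm_indication_lines_py lines max_items → D_extract_kpm_indication_lines_py lines max_items → extract_kpm_indication_lines_py lines max_items ≠ extract_kpm_indication_lines_py_alt lines max_items

-- ===== LEMMAS AND PROOFS =====

-- the stripped, kept texts of a line list, in order
def pvTexts (ls : List String) : List String := (ls.map PySem.Str.strip).filter pvKeep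

-- keep-first dedup with an explicit seen list (spec of A's reversed scan without the break)
def pvDedupF : List String → List String → List String
  | [], _ => []
  | t :: ts, seen => if t ∈ seen then pvDedupF ts seen else t :: pvDedupF ts (seen ++ [t])

-- one step of B's keep-last accumulation, on a kept text
def pvStepT (r : List String) (t : String) : List String :=
  (if t ∈ r then r.erase t else r) ++ [t]

theorem pvALoop_cons (k : Int) (line : String) (rest picked seen : List String) :
    pvALoop k (line :: rest) picked seen =
      if pvKeep (PySem.Str.strip line) = true then
        (if PySem.Str.strip line ∈ seen then pvALoop k rest picked seen
         else if k ≤ ((picked.length : Int) + 1) then picked ++ [PySem.Str.strip line]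
         else pvALoop k rest (picked ++ [PySem.Str.strip line]) (seen ++ [PySem.Str.strip line]))
      else pvALoop k rest picked seen := by
  by_cases h1 : PySem.Str.strip line == ""
  · simp [pvALoop, pvKeep, h1]
  · by_cases h2 : pvLooksLikeKpm (PySem.Str.strip line)
    · by_cases h3 : PySem.Str.strip line ∈ seen
      · simp [pvALoop, pvKeep, h1, h2, h3, List.contains_eq_mem]
      · by_cases h4 : k ≤ ((picked.length : Int) + 1)
        · simp [pvALoop, pvKeep, h1, h2, h3, h4, List.contains_eq_mem]
        · simp [pvALoop, pvKeep, PySem.Set.add, h1, h2, h3, h4, List.contains_eq_mem]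
    · simp [pvALoop, pvKeep, h1, h2]

theorem pvTexts_cons (l : String) (ls : List String) :
    pvTexts (l :: ls) =
      if pvKeep (PySem.Str.strip l) = true then PySem.Str.strip l :: pvTexts ls else pvTexts ls := by
  by_cases h : pvKeep (PySem.Str.strip l) <;> simp [pvTexts, h]

theorem pvBStep_eq (r : List String) (l : String) :
    pvBStep r l = if pvKeep (PySem.Str.strip l) = true then pvStepT r (PySem.Str.strip l) else r := by
  by_cases h1 : PySem.Str.strip l == ""
  · simp [pvBStep, pvKeep, h1]
  · by_cases h2 : pvLooksLikeKpm (PySem.Str.strip l)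
    · by_cases h3 : (PySem.Str.strip l) ∈ r
      · simp [pvBStep, pvStepT, pvKeep, h1, h2, h3, List.contains_eq_mem,
          PySem.List.remove?_eq_some_erase r _ h3]
      · simp [pvBStep, pvStepT, pvKeep, h1, h2, h3, List.contains_eq_mem]
    · simp [pvBStep, pvKeep, h1, h2]

theorem foldl_pvBStep (ls : List String) (r : List String) :
    ls.foldl pvBStep r = (pvTexts ls).foldl pvStepT r := by
  induction ls generalizing r with
  | nil => simp [pvTexts]
  | cons l ls ih =>
    rw [List.foldl_cons, pvBStep_eq, pvTexts_cons]
    by_cases h : pvKeep (PySem.Str.strip l) = true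
    · simp only [h, if_true, List.foldl_cons]
      exact ih _
    · simp only [h]
      exact ih _

theorem pvALoop_eq (k : Int) (rls : List String) : ∀ (picked seen : List String),
    (picked.length : Int) < k →
    pvALoop k rls picked seen = picked ++ (pvDedupF (pvTexts rls) seen).take (k.toNat - picked.length) := by
  induction rls with
  | nil => intro picked seen h; simp [pvALoop, pvTexts, pvDedupF]
  | cons line rest ih =>
    intro picked seen h
    rw [pvALoop_cons, pvTexts_cons]
    by_cases hkeep : pvKeep (PySem.Str.strip line) = true
    · simp only [hkeep, if_true]
      by_cases h3 : PySem.Str.strip line ∈ seen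
      · simp only [h3, if_true, pvDedupF]
        exact ih picked seen h
      · simp only [h3, if_false, pvDedupF]
        by_cases h4 : k ≤ ((picked.length : Int) + 1)
        · have hlen : k.toNat - picked.length = 1 := by omega
          simp [h4, hlen]
        · have h4' : (((picked ++ [PySem.Str.strip line]).length : Nat) : Int) < k := by
            simp; omega
          have hstep : k.toNat - picked.length = (k.toNat - (picked.length + 1)) + 1 := by omega
          simp only [h4, if_false]
          rw [ih _ _ h4', hstep, List.take_succ_cons]
          simp
    · simp only [hkeep]
      exact ih picked seen h

theorem pvDedupF_congr (ts : List String) : ∀ s₁ s₂ : List String,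
    (∀ x, x ∈ s₁ ↔ x ∈ s₂) → pvDedupF ts s₁ = pvDedupF ts s₂ := by
  induction ts with
  | nil => intro s₁ s₂ _; rfl
  | cons t ts ih =>
    intro s₁ s₂ hmem
    by_cases h : t ∈ s₁
    · rw [pvDedupF, pvDedupF, if_pos h, if_pos ((hmem t).mp h)]
      exact ih s₁ s₂ hmem
    · rw [pvDedupF, pvDedupF, if_neg h, if_neg (fun hc => h ((hmem t).mpr hc))]
      refine congrArg _ (ih _ _ ?_)
      intro x; simp [hmem x]

theorem pvDedupF_append (ts : List String) : ∀ (s : List String) (t : String),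
    pvDedupF ts (s ++ [t]) = (pvDedupF ts s).erase t := by
  induction ts with
  | nil => intro s t; simp [pvDedupF]
  | cons u ts ih =>
    intro s t
    by_cases hu : u ∈ s
    · rw [pvDedupF, pvDedupF, if_pos hu, if_pos (by simp [hu])]
      exact ih s t
    · by_cases hut : u = t
      · subst hut
        rw [pvDedupF, pvDedupF, if_neg hu, if_pos (by simp)]
        rw [List.erase_cons_head, ih s u]
      · rw [pvDedupF, pvDedupF, if_neg hu, if_neg (by simp [hu, hut])]
        rw [List.erase_cons_tail (by simpa using hut)]
        refine congrArg _ ?_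
        rw [pvDedupF_congr ts ((s ++ [t]) ++ [u]) ((s ++ [u]) ++ [t]) (by intro x; simp; tauto)]
        exact ih (s ++ [u]) t

theorem nodup_foldl_pvStepT (ts : List String) : ∀ r : List String,
    r.Nodup → (ts.foldl pvStepT r).Nodup := by
  induction ts with
  | nil => intro r h; simpa using h
  | cons t ts ih =>
    intro r h
    refine ih _ ?_
    by_cases hm : t ∈ r
    · rw [pvStepT, if_pos hm]
      exact (h.erase t).append (List.nodup_singleton t)
        (fun a ha hb => h.not_mem_erase ((List.mem_singleton.mp hb) ▸ ha))
    · rw [pvStepT, if_neg hm]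
      exact h.append (List.nodup_singleton t)
        (fun a ha hb => hm ((List.mem_singleton.mp hb) ▸ ha))

theorem foldl_pvStepT_eq_dedup (ts : List String) :
    ts.foldl pvStepT [] = (pvDedupF ts.reverse []).reverse := by
  induction ts using List.reverseRecOn with
  | nil => rfl
  | append_singleton as t ih =>
    rw [List.foldl_append, List.foldl_cons, List.foldl_nil, List.reverse_append]
    have hF : pvDedupF as.reverse [] = (as.foldl pvStepT []).reverse := by
      rw [ih, List.reverse_reverse]
    have hd : pvDedupF (t :: as.reverse) [] = t :: (pvDedupF as.reverse []).erase t := by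
      rw [pvDedupF, if_neg (List.not_mem_nil), show (([] : List String) ++ [t]) = [] ++ [t] from rfl,
        pvDedupF_append]
    simp only [List.reverse_cons, List.reverse_nil, List.nil_append, List.singleton_append, hd, hF]
    have hnd : (as.foldl pvStepT []).Nodup := nodup_foldl_pvStepT as [] List.nodup_nil
    set F := as.foldl pvStepT [] with hFdef
    by_cases hm : t ∈ F
    · have he : F.reverse.erase t = (F.erase t).reverse := by
        rw [(List.nodup_reverse.mpr hnd).erase_eq_filter, hnd.erase_eq_filter, List.filter_reverse]
      simp [pvStepT, hm, he]
    · have he : F.reverse.erase t = F.reverse := List.erase_of_not_mem (by simpa using hm)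
      simp [pvStepT, hm, he]

theorem pvTexts_reverse (ls : List String) : pvTexts ls.reverse = (pvTexts ls).reverse := by
  simp [pvTexts, List.map_reverse, List.filter_reverse]

theorem pvALoop_ne_nil (k : Int) (hk : k ≤ 1) (rls : List String) :
    pvTexts rls ≠ [] → pvALoop k rls [] [] ≠ [] := by
  induction rls with
  | nil => intro h; exact absurd rfl h
  | cons line rest ih =>
    intro h
    rw [pvALoop_cons]
    by_cases hkeep : pvKeep (PySem.Str.strip line) = true
    · rw [if_pos hkeep, if_neg (List.not_mem_nil), if_pos (by simpa using hk)]
      simp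
    · rw [if_neg hkeep]
      refine ih ?_
      rw [pvTexts_cons, if_neg hkeep] at h
      exact h

theorem pvALoop_texts_nil (k : Int) (rls : List String) : ∀ picked seen,
    pvTexts rls = [] → pvALoop k rls picked seen = picked := by
  induction rls with
  | nil => intro picked seen _; rfl
  | cons line rest ih =>
    intro picked seen h
    rw [pvTexts_cons] at h
    by_cases hkeep : pvKeep (PySem.Str.strip line) = true
    · rw [if_pos hkeep] at h; exact absurd h (by simp)
    · rw [if_neg hkeep] at h
      rw [pvALoop_cons, if_neg hkeep]
      exact ih picked seen h

-- ===== VERDICT (by name: the statement is the Claim_ definition above) =====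
theorem extract_kpm_indication_lines_py_spec : Claim_unchanged_extract_kpm_indication_lines_py := by
  intro lines k _ hnd
  unfold extract_kpm_indication_lines_py extract_kpm_indication_lines_py_alt
  rw [foldl_pvBStep]
  by_cases hk : 0 < k
  · have h0 : ((([] : List String).length : Int)) < k := by simpa using hk
    rw [show (PySem.Set.empty : PySem.Set String) = ([] : List String) from rfl]
    rw [pvALoop_eq k lines.reverse [] [] h0, pvTexts_reverse]
    rw [foldl_pvStepT_eq_dedup]
    set F := pvDedupF (pvTexts lines).reverse [] with hF
    have hkk : -k = -((k.toNat : Nat) : Int) := by omega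
    simp only [if_pos hk, List.nil_append, List.length_nil, Nat.sub_zero]
    rw [hkk, PySem.List.slice_some_none,
      PySem.List.clampIdx_neg_natCast _ _ (by omega)]
    simp [List.reverse_take]
  · have hk0 : k ≤ 0 := by omega
    have hany : lines.any (fun l => pvKeep (PySem.Str.strip l)) = false := by
      by_contra hc
      exact hnd ⟨hk0, by simpa using Bool.not_eq_false _ |>.mp hc⟩
    have htx : pvTexts lines = [] := by
      rw [pvTexts, List.filter_eq_nil_iff]
      intro a ha
      obtain ⟨l, hl, rfl⟩ := List.mem_map.mp ha
      have := List.any_eq_false.mp hany l hl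
      simpa using this
    have htxr : pvTexts lines.reverse = [] := by rw [pvTexts_reverse, htx, List.reverse_nil]
    rw [show (PySem.Set.empty : PySem.Set String) = ([] : List String) from rfl]
    rw [pvALoop_texts_nil k lines.reverse [] [] htxr, htx]
    simp [if_neg hk]

theorem extract_kpm_indication_lines_py_changed : Claim_changed_extract_kpm_indication_lines_py := by
  unfold Claim_changed_extract_kpm_indication_lines_py; decide

theorem extract_kpm_indication_lines_py_tight : Claim_exact_extract_kpm_indication_lines_py := by
  intro lines k _ hd
  obtain ⟨hk, hany⟩ := hd
  have hne : pvTexts lines.reverse ≠ [] := by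
    rw [pvTexts_reverse]
    simp only [ne_eq, List.reverse_eq_nil_iff]
    obtain ⟨l, hl, hfl⟩ := List.any_eq_true.mp hany
    intro h0
    have hmem : PySem.Str.strip l ∈ pvTexts lines :=
      List.mem_filter.mpr ⟨List.mem_map_of_mem hl, by simpa using hfl⟩
    rw [h0] at hmem
    exact List.not_mem_nil hmem
  have hA := pvALoop_ne_nil k (by omega) lines.reverse hne
  unfold extract_kpm_indication_lines_py extract_kpm_indication_lines_py_alt
  rw [show (PySem.Set.empty : PySem.Set String) = ([] : List String) from rfl]
  rw [if_neg (by omega : ¬ (0:Int) < k)]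
  simpa using hA
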